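-- pv_equiv track=rewrite | github.com/kuku1234us/music-player | music_player/models/StreamPicker.py | _lang_match_score
-- ===== SOURCE A (Python) =====
-- from typing import Any, Optional
--
-- def _norm_lang(lang: Any) -> str:
--     """
--     Normalize language tags like:
--     - "en", "en-US", "en_US", "EN-us" -> "en-us"
--     """
--     s = str(lang or "").strip()
--     if not s:
--         return ""
--     s = s.replace("_", "-").lower()
--     # Collapse accidental repeats like "en--us"
--     while "--" in s:
--         s = s.replace("--", "-")
--     return s
--
-- def _lang_match_score(candidate_lang: str, preferred_langs: tuple[str, ...]) -> int:
--     """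
--     Returns:
--     - 3 for exact match (e.g., en-us == en-us)
--     - 2 for base match (e.g., en-us matches en)
--     - 1 for prefix match (e.g., en matches en-us)
--     - 0 for no match / unknown
--     """
--     c = _norm_lang(candidate_lang)
--     if not c or not preferred_langs:
--         return 0
--     prefs = tuple(_norm_lang(x) for x in preferred_langs if x)
--     if not prefs:
--         return 0
--
--     if any(c == p for p in prefs):
--         return 3
--
--     c_base = c.split("-", 1)[0]
--     if any((p.split("-", 1)[0] == c_base) and (p == c_base or c == c_base) for p in prefs):
--         return 2
--
--     # Weak prefix check
--     if any(c.startswith(p + "-") for p in prefs if p and "-" not in p):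
--         return 1
--     if any(p.startswith(c + "-") for p in prefs if c and "-" not in c):
--         return 1
--     return 0
-- ===== SOURCE B (Python) =====
-- def _norm_lang(lang) -> str:
--     s = str(lang or "").strip()
--     if not s:
--         return ""
--     s = s.replace("_", "-").lower()
--     while "--" in s:
--         s = s.replace("--", "-")
--     return s
--
-- def _pref_score(c: str, c_base: str, p: str) -> int:
--     if c == p:
--         return 3
--     if p.split("-", 1)[0] == c_base and (p == c_base or c == c_base):
--         return 2
--     if (p and "-" not in p and c.startswith(p + "-")) or (
--         "-" not in c and p.startswith(c + "-")
--     ):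
--         return 1
--     return 0
--
-- def _lang_match_score(candidate_lang: str, preferred_langs: tuple[str, ...]) -> int:
--     c = _norm_lang(candidate_lang)
--     if not c:
--         return 0
--     prefs = [_norm_lang(x) for x in preferred_langs if x]
--     c_base = c.split("-", 1)[0]
--     best = 0
--     for p in prefs:
--         best = max(best, _pref_score(c, c_base, p))
--     return best
-- ===== Notes on version B (the rewrite author's own statement) =====
-- stated objective: simpler
-- what changed: Replaces the four separate any(...) scans over prefs with a single pass that computes one per-preference tier score and keeps a running maximum; the empty-tuple and empty-prefs guards disappear because the fold returns 0 there anyway.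
import Mathlib
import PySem

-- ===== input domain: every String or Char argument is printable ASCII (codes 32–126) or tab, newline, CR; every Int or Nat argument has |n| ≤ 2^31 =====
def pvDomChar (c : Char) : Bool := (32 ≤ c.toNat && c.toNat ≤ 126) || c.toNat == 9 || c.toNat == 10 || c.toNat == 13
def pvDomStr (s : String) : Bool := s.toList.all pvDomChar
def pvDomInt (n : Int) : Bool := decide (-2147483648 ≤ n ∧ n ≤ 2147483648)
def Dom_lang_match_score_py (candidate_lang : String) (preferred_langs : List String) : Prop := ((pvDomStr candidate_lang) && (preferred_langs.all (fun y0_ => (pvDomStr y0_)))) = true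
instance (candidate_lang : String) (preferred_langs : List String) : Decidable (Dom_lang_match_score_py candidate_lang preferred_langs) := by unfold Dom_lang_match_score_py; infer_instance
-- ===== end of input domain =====

-- B replaces A's four separate any(...) scans over prefs with one pass keeping a
-- running maximum of a per-preference tier score (objective: simpler).

-- ===== PORT A =====
-- shared helper: _norm_lang (identical in Source A and Source B).
-- the Python 'while "--" in s' loop, ported with fuel s.length (each replace of
-- "--" by "-" strictly shrinks s, so the fuel always suffices; exact behaviour).
def pvCollapseGo : Nat → String → String
  | 0, s => s
  | n + 1, s =>
    if PySem.Str.isIn "--" s then pvCollapseGo n (PySem.Str.replace s "--" "-") else s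

def pvNormLang (lang : String) : String :=
  let s := PySem.Str.strip lang
  if s == "" then ""
  else
    let s := PySem.Str.lower (PySem.Str.replace s "_" "-")
    pvCollapseGo s.length s

-- s.split("-", 1)[0]  (splitMax? with sep "-" is always 'some' of a nonempty list)
def pvSplitHead (s : String) : String :=
  match PySem.Str.splitMax? s "-" 1 with
  | some (h :: _) => h
  | _ => s

def lang_match_score_py (candidate_lang : String) (preferred_langs : List String) : Int :=
  let c := pvNormLang candidate_lang
  if c == "" || preferred_langs.isEmpty then 0
  else
    let prefs := (preferred_langs.filter (fun x => x != "")).map pvNormLang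
    if prefs.isEmpty then 0
    else if prefs.any (fun p => c == p) then 3
    else
      let c_base := pvSplitHead c
      if prefs.any (fun p => pvSplitHead p == c_base && (p == c_base || c == c_base)) then 2
      else if (prefs.filter (fun p => p != "" && !PySem.Str.isIn "-" p)).any
                (fun p => PySem.Str.startswith c (p ++ "-")) then 1
      else if (prefs.filter (fun _ => c != "" && !PySem.Str.isIn "-" c)).any
                (fun p => PySem.Str.startswith p (c ++ "-")) then 1
      else 0

-- ===== PORT B =====
def pvPrefScore (c c_base p : String) : Int :=
  if c == p then 3
  else if pvSplitHead p == c_base && (p == c_base || c == c_base) then 2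
  else if (p != "" && !PySem.Str.isIn "-" p && PySem.Str.startswith c (p ++ "-"))
          || (!PySem.Str.isIn "-" c && PySem.Str.startswith p (c ++ "-")) then 1
  else 0

def lang_match_score_py_alt (candidate_lang : String) (preferred_langs : List String) : Int :=
  let c := pvNormLang candidate_lang
  if c == "" then 0
  else
    let prefs := (preferred_langs.filter (fun x => x != "")).map pvNormLang
    let c_base := pvSplitHead c
    prefs.foldl (fun best p => max best (pvPrefScore c c_base p)) 0

-- ===== PRECONDITION & SPEC =====
def Spec_lang_match_score_py (candidate_lang : String) (preferred_langs : List String) (out : Int) : Prop := out = lang_match_score_py_alt candidate_lang preferred_langs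
instance (candidate_lang : String) (preferred_langs : List String) (out : Int) : Decidable (Spec_lang_match_score_py candidate_lang preferred_langs out) := by unfold Spec_lang_match_score_py; infer_instance

-- ===== CLAIM (what is proved, stated in full; the proofs are below) =====
def Claim_equal_lang_match_score_py : Prop := ∀ (candidate_lang : String) (preferred_langs : List String), Dom_lang_match_score_py candidate_lang preferred_langs → Spec_lang_match_score_py candidate_lang preferred_langs (lang_match_score_py candidate_lang preferred_langs)

-- ===== LEMMAS AND PROOFS =====

-- the tiered value A computes on a list of prefs (the four anys, combined per element)
def pvTier (c c_base : String) (l : List String) : Int :=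
  if l.any (fun p => c == p) then 3
  else if l.any (fun p => pvSplitHead p == c_base && (p == c_base || c == c_base)) then 2
  else if l.any (fun p =>
      (p != "" && !PySem.Str.isIn "-" p && PySem.Str.startswith c (p ++ "-"))
      || (!PySem.Str.isIn "-" c && PySem.Str.startswith p (c ++ "-"))) then 1
  else 0

-- the running maximum B computes, as structural recursion
def pvMaxScore (c c_base : String) : List String → Int
  | [] => 0
  | p :: t => max (pvPrefScore c c_base p) (pvMaxScore c c_base t)

theorem pvMaxScore_nonneg (c c_base : String) (l : List String) :
    0 ≤ pvMaxScore c c_base l := by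
  induction l with
  | nil => simp [pvMaxScore]
  | cons p t ih => exact le_trans ih (le_max_right _ _)

theorem pvFoldl_eq_maxScore (c c_base : String) (l : List String) :
    ∀ a : Int, 0 ≤ a →
      l.foldl (fun best p => max best (pvPrefScore c c_base p)) a
        = max a (pvMaxScore c c_base l) := by
  induction l with
  | nil => intro a ha; simp [pvMaxScore, max_eq_left ha]
  | cons p t ih =>
      intro a ha
      rw [List.foldl_cons, ih (max a (pvPrefScore c c_base p)) (le_trans ha (le_max_left _ _))]
      show _ = max a (max (pvPrefScore c c_base p) (pvMaxScore c c_base t))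
      rw [max_assoc]

theorem pvTier_eq_maxScore (c c_base : String) (l : List String) :
    pvTier c c_base l = pvMaxScore c c_base l := by
  induction l with
  | nil => simp [pvTier, pvMaxScore]
  | cons p t ih =>
      have hm : pvMaxScore c c_base (p :: t)
          = max (pvPrefScore c c_base p) (pvMaxScore c c_base t) := rfl
      rw [hm, ← ih]
      unfold pvTier pvPrefScore
      simp only [List.any_cons]
      rcases Bool.eq_false_or_eq_true (c == p) with h1|h1 <;>
        rcases Bool.eq_false_or_eq_true
          (pvSplitHead p == c_base && (p == c_base || c == c_base)) with h2|h2 <;>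
        rcases Bool.eq_false_or_eq_true
          ((p != "" && !PySem.Str.isIn "-" p && PySem.Str.startswith c (p ++ "-"))
            || (!PySem.Str.isIn "-" c && PySem.Str.startswith p (c ++ "-"))) with h3|h3 <;>
        rcases Bool.eq_false_or_eq_true (t.any (fun q => c == q)) with h4|h4 <;>
        rcases Bool.eq_false_or_eq_true
          (t.any (fun q => pvSplitHead q == c_base && (q == c_base || c == c_base))) with h5|h5 <;>
        rcases Bool.eq_false_or_eq_true (t.any (fun q =>
          (q != "" && !PySem.Str.isIn "-" q && PySem.Str.startswith c (q ++ "-"))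
          || (!PySem.Str.isIn "-" c && PySem.Str.startswith q (c ++ "-")))) with h6|h6 <;>
        simp only [h1, h2, h3, h4, h5, h6] <;> decide

theorem pvAny_or (f g : String → Bool) (l : List String) :
    l.any (fun p => f p || g p) = (l.any f || l.any g) := by
  induction l with
  | nil => rfl
  | cons h t ih =>
      simp only [List.any_cons, ih]
      rcases Bool.eq_false_or_eq_true (f h) with h1|h1 <;>
        rcases Bool.eq_false_or_eq_true (g h) with h2|h2 <;>
        simp [h1, h2, Bool.or_comm]

theorem pvAny_filter (f g : String → Bool) (l : List String) :
    (l.filter f).any g = l.any (fun p => f p && g p) := by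
  induction l with
  | nil => rfl
  | cons h t ih =>
      by_cases hf : f h = true <;> simp [hf, ih]

theorem lang_match_score_py_spec : Claim_equal_lang_match_score_py := by
  intro candidate_lang preferred_langs _
  unfold Spec_lang_match_score_py
  show lang_match_score_py _ _ = _
  unfold lang_match_score_py lang_match_score_py_alt
  simp only []
  set c := pvNormLang candidate_lang with hc
  by_cases hce : (c == "") = true
  · simp [hce]
  · have hce' : (c == "") = false := (Bool.not_eq_true _) ▸ hce
    simp only [hce', Bool.false_or, Bool.false_eq_true, if_false]
    set prefs := (preferred_langs.filter (fun x => x != "")).map pvNormLang with hprefs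
    set c_base := pvSplitHead c with hcb
    rw [pvFoldl_eq_maxScore c c_base prefs 0 le_rfl,
      max_eq_right (pvMaxScore_nonneg c c_base prefs), ← pvTier_eq_maxScore]
    by_cases hpl : preferred_langs.isEmpty = true
    · have h0 : prefs = [] := by
        simp [hprefs, List.isEmpty_iff.mp hpl]
      simp [hpl, h0, pvTier]
    · have hpl' : preferred_langs.isEmpty = false := (Bool.not_eq_true _) ▸ hpl
      simp only [hpl', Bool.false_eq_true, if_false]
      by_cases hpe : prefs.isEmpty = true
      · simp [List.isEmpty_iff.mp hpe, pvTier]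
      · have hpe' : prefs.isEmpty = false := (Bool.not_eq_true _) ▸ hpe
        simp only [hpe', Bool.false_eq_true, if_false]
        have hc' : (c != "") = true := by simp [bne, hce']
        have hsplit :
            (prefs.any fun p =>
              (p != "" && !PySem.Str.isIn "-" p && PySem.Str.startswith c (p ++ "-"))
              || (!PySem.Str.isIn "-" c && PySem.Str.startswith p (c ++ "-")))
            = ((prefs.any fun p =>
                  (p != "" && !PySem.Str.isIn "-" p) && PySem.Str.startswith c (p ++ "-"))
              || (prefs.any fun p =>
                  (c != "" && !PySem.Str.isIn "-" c) && PySem.Str.startswith p (c ++ "-"))) := by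
          rw [← pvAny_or]
          refine List.any_congr rfl (fun p => ?_)
          rw [hc']
          rcases Bool.eq_false_or_eq_true (p != "") with g1|g1 <;>
            rcases Bool.eq_false_or_eq_true (!PySem.Str.isIn "-" p) with g2|g2 <;>
            rcases Bool.eq_false_or_eq_true (PySem.Str.startswith c (p ++ "-")) with g3|g3 <;>
            rcases Bool.eq_false_or_eq_true (!PySem.Str.isIn "-" c) with g4|g4 <;>
            rcases Bool.eq_false_or_eq_true (PySem.Str.startswith p (c ++ "-")) with g5|g5 <;>
            simp only [g1, g2, g3, g4, g5] <;> decide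
        unfold pvTier
        rw [pvAny_filter, pvAny_filter, hsplit]
        have hcc : (fun _ : String => c != "" && !PySem.Str.isIn "-" c)
            = (fun _ : String => !PySem.Str.isIn "-" c) := by
          funext _; rw [hc', Bool.true_and]
        rcases Bool.eq_false_or_eq_true (prefs.any (fun p => c == p)) with hX|hX <;>
          rcases Bool.eq_false_or_eq_true (prefs.any
            (fun p => pvSplitHead p == c_base && (p == c_base || c == c_base))) with hY|hY <;>
          rcases Bool.eq_false_or_eq_true (prefs.any
            (fun p => (p != "" && !PySem.Str.isIn "-" p)
              && PySem.Str.startswith c (p ++ "-"))) with hA|hA <;>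
          rcases Bool.eq_false_or_eq_true (prefs.any
            (fun p => (c != "" && !PySem.Str.isIn "-" c)
              && PySem.Str.startswith p (c ++ "-"))) with hB|hB <;>
          simp only [hX, hY, hA, hB] <;> decide
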